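-- pv_equiv track=rewrite | github.com/veryfansome/germ | bot/lang/controllers/english.py | extract_sentence_chunks
-- ===== SOURCE A (Python) =====
-- def extract_sentence_chunks(pos_labels):
--     """
--     Given a list of token POS labels (e.g., ['IN', 'DT', ... ',', ... '.']),
--     return lists of consecutive index values for tokens whose POS is not punctuation.
--     """
--     punctuation_tags = {",", ".", ":"}
--     groups = []
--     current_group = []
--
--     for i, pos_tag in enumerate(pos_labels):
--         if pos_tag not in punctuation_tags:
--             current_group.append(i)
--         else:
--             if current_group:
--                 # We've reached a punctuation mark, so close off the current group
--                 groups.append(current_group)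
--                 current_group = []
--
--     # If the final tokens were non-punctuation, end the last group
--     if current_group:
--         groups.append(current_group)
--
--     return groups
-- ===== SOURCE B (Python) =====
-- def extract_sentence_chunks(pos_labels):
--     punctuation_tags = {",", ".", ":"}
--     # Phase 1: collect the positions of punctuation tokens (the cut points).
--     cuts = [i for i, t in enumerate(pos_labels) if t in punctuation_tags]
--     # Phase 2: emit the index range strictly between consecutive cut points.
--     groups = []
--     prev = -1
--     for b in cuts + [len(pos_labels)]:
--         if prev + 1 < b:
--             groups.append(list(range(prev + 1, b)))
--         prev = b
--     return groups
-- ===== Notes on version B (the rewrite author's own statement) =====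
-- stated objective: alternative
-- what changed: Instead of one pass with a growing current-group accumulator that is flushed on punctuation and at the end, B first collects the punctuation positions (cut points) and then emits list(range(prev+1, b)) for each pair of consecutive cut points (with -1 and len as sentinels), so no per-token accumulator or end-of-loop flush exists.
import Mathlib
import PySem

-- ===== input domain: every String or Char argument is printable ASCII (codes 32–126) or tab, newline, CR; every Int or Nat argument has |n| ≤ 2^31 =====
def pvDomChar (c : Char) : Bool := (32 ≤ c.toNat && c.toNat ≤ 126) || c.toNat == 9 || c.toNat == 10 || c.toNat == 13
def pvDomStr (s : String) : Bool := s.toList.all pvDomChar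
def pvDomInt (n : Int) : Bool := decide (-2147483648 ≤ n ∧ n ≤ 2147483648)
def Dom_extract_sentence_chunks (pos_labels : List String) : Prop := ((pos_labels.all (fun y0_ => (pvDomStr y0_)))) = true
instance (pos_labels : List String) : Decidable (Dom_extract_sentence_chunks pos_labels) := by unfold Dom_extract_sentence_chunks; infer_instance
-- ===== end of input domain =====

-- ===== PORT A =====
-- B changes the decomposition: A keeps a running current-group accumulator flushed on
-- punctuation; B first lists the punctuation positions, then emits the index ranges between them.
def pvPunct : PySem.Set String := PySem.Set.ofList [",", ".", ":"]

def pvStepA (s : List (List Int) × List Int) (p : Int × String) : List (List Int) × List Int :=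
  if ¬ PySem.Set.contains pvPunct p.2 then (s.1, s.2 ++ [p.1])
  else if s.2 ≠ [] then (s.1 ++ [s.2], []) else s

def extract_sentence_chunks (pos_labels : List String) : List (List Int) :=
  let r := (PySem.List.enumerate pos_labels).foldl pvStepA ([], [])
  if r.2 ≠ [] then r.1 ++ [r.2] else r.1

-- ===== PORT B =====

def pvStepB (s : List (List Int) × Int) (b : Int) : List (List Int) × Int :=
  (if s.2 + 1 < b then s.1 ++ [PySem.List.pyRange (s.2 + 1) b 1] else s.1, b)

def extract_sentence_chunks_alt (pos_labels : List String) : List (List Int) :=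
  let cuts := (PySem.List.enumerate pos_labels).filterMap
    (fun p => if PySem.Set.contains pvPunct p.2 then some p.1 else none)
  let r := (cuts ++ [(pos_labels.length : Int)]).foldl pvStepB ([], -1)
  r.1

-- ===== PRECONDITION & SPEC =====
def Spec_extract_sentence_chunks (pos_labels : List String) (out : List (List Int)) : Prop := out = extract_sentence_chunks_alt pos_labels
instance (pos_labels : List String) (out : List (List Int)) : Decidable (Spec_extract_sentence_chunks pos_labels out) := by unfold Spec_extract_sentence_chunks; infer_instance

-- ===== CLAIM =====
def Claim_equal_extract_sentence_chunks : Prop := ∀ (pos_labels : List String), Dom_extract_sentence_chunks pos_labels → Spec_extract_sentence_chunks pos_labels (extract_sentence_chunks pos_labels)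

-- ===== LEMMAS AND PROOFS =====
-- Common specification: process the remaining labels at index i, last cut (or -1) at a.
def pvS (a i : Int) (xs : List String) : List (List Int) :=
  match xs with
  | [] => if a + 1 < i then [PySem.List.pyRange (a + 1) i 1] else []
  | x :: r =>
    if PySem.Set.contains pvPunct x then
      (if a + 1 < i then [PySem.List.pyRange (a + 1) i 1] else []) ++ pvS i (i + 1) r
    else pvS a (i + 1) r

theorem pvRange_ne_nil {a b : Int} (h : a < b) : PySem.List.pyRange a b 1 ≠ [] := by
  rw [PySem.List.pyRange_one_cons h]; simp

theorem pvA_inv (xs : List String) : ∀ (i a : Int) (g : List (List Int)), a + 1 ≤ i →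
    (let r := (PySem.List.enumerate xs i).foldl pvStepA (g, PySem.List.pyRange (a + 1) i 1);
     if r.2 ≠ [] then r.1 ++ [r.2] else r.1) = g ++ pvS a i xs := by
  induction xs with
  | nil =>
    intro i a g h
    simp only [PySem.List.enumerate_nil, List.foldl_nil, pvS]
    by_cases hb : a + 1 < i
    · rw [if_pos hb, if_pos (pvRange_ne_nil hb)]
    · rw [if_neg hb, if_neg (by simp [PySem.List.pyRange_one_eq_nil (by omega : i ≤ a + 1)])]
      simp
  | cons x r ih =>
    intro i a g h
    simp only [PySem.List.enumerate_cons, List.foldl_cons, pvS]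
    by_cases hp : PySem.Set.contains pvPunct x
    · rw [if_pos hp]
      have hstep : pvStepA (g, PySem.List.pyRange (a + 1) i 1) (i, x)
          = ((if a + 1 < i then g ++ [PySem.List.pyRange (a + 1) i 1] else g), []) := by
        simp only [pvStepA, hp]
        by_cases hb : a + 1 < i
        · simp [pvRange_ne_nil hb, hb]
        · simp [PySem.List.pyRange_one_eq_nil (show i ≤ a + 1 by omega), hb]
      rw [hstep]
      have ihr := ih (i + 1) i
        (if a + 1 < i then g ++ [PySem.List.pyRange (a + 1) i 1] else g) (by omega)
      rw [PySem.List.pyRange_one_eq_nil (le_refl (i + 1))] at ihr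
      rw [ihr]
      by_cases hb : a + 1 < i
      · simp [hb]
      · simp [hb]
    · rw [if_neg hp]
      have hstep : pvStepA (g, PySem.List.pyRange (a + 1) i 1) (i, x)
          = (g, PySem.List.pyRange (a + 1) (i + 1) 1) := by
        simp only [pvStepA, hp]
        rw [PySem.List.pyRange_one_succ_right (by omega)]
        simp
      rw [hstep]
      exact ih (i + 1) a g (by omega)

theorem pvB_inv (xs : List String) : ∀ (i a : Int) (g : List (List Int)), a ≤ i →
    (((PySem.List.enumerate xs i).filterMap
        (fun p => if PySem.Set.contains pvPunct p.2 then some p.1 else none)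
      ++ [i + (xs.length : Int)]).foldl pvStepB (g, a)).1 = g ++ pvS a i xs := by
  induction xs with
  | nil =>
    intro i a g h
    simp only [PySem.List.enumerate_nil, List.filterMap_nil, List.length_nil, Int.ofNat_zero,
      List.nil_append, List.foldl_cons, List.foldl_nil, pvS, pvStepB]
    by_cases hb : a + 1 < i + 0
    · rw [if_pos hb]; rw [if_pos (by omega)]; simp
    · rw [if_neg hb]; rw [if_neg (by omega)]; simp
  | cons x r ih =>
    intro i a g h
    simp only [PySem.List.enumerate_cons, List.filterMap_cons, pvS]
    by_cases hp : PySem.Set.contains pvPunct x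
    · simp only [hp, if_pos, List.cons_append, List.foldl_cons]
      have hs : pvStepB (g, a) i
          = (g ++ (if a + 1 < i then [PySem.List.pyRange (a + 1) i 1] else []), i) := by
        simp only [pvStepB]
        by_cases hb : a + 1 < i
        · rw [if_pos hb, if_pos hb]
        · rw [if_neg hb, if_neg hb]; simp
      rw [hs]
      have := ih (i + 1) i (g ++ (if a + 1 < i then [PySem.List.pyRange (a + 1) i 1] else []))
        (by omega)
      simpa [List.length_cons, List.append_assoc, add_assoc, add_comm, add_left_comm] using this
    · simp only [hp]
      have := ih (i + 1) a g (by omega)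
      simpa [List.length_cons, add_assoc, add_comm, add_left_comm] using this

-- ===== VERDICT =====
theorem extract_sentence_chunks_spec : Claim_equal_extract_sentence_chunks := by
  intro pos_labels _
  unfold Spec_extract_sentence_chunks extract_sentence_chunks extract_sentence_chunks_alt
  have hA := pvA_inv pos_labels 0 (-1) [] (by omega)
  have hB := pvB_inv pos_labels 0 (-1) [] (by omega)
  simp only [show (-1 : Int) + 1 = 0 from rfl, PySem.List.pyRange_one_eq_nil (le_refl 0)] at hA
  simp only [zero_add] at hB
  simp only [] at hA hB ⊢
  rw [hA, hB]
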